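-- pv_equiv track=rewrite | github.com/jrandiny/TubesOGLAlgeo | src/transformasi.py | parserLocate
-- ===== SOURCE A (Python) =====
-- def parserLocate(x):
--     i=0
--     idxkb=idxkoma1=idxkoma2=idxkt=-1
--     jumlah=0
--     while(i<len(x)):
--         if(x[i]=='('):
--             idxkb=i
--         elif(x[i]==')'):
--             idxkt=i
--         elif(x[i]==',' and jumlah == 0):
--             idxkoma1=i
--             jumlah+=1
--         elif(x[i]==',' and jumlah == 1):
--             idxkoma2=i
--         i+=1
--     result=[idxkb]
--     result.append(idxkoma1)
--     result.append(idxkoma2)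
--     result.append(idxkt)
--     return result
-- ===== SOURCE B (Python) =====
-- def parserLocate(x):
--     idxkb = x.rfind('(')
--     idxkt = x.rfind(')')
--     idxkoma1 = x.find(',')
--     idxkoma2 = x.rfind(',')
--     if idxkoma2 == idxkoma1:
--         idxkoma2 = -1
--     return [idxkb, idxkoma1, idxkoma2, idxkt]
-- ===== Notes on version B (the rewrite author's own statement) =====
-- stated objective: faster
-- what changed: Replaced the single interleaved per-character index loop with four targeted built-in string searches: rfind for each parenthesis kind and for the last comma, find for the first comma, returning -1 for the second slot when the last comma coincides with the first.
import Mathlib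
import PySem

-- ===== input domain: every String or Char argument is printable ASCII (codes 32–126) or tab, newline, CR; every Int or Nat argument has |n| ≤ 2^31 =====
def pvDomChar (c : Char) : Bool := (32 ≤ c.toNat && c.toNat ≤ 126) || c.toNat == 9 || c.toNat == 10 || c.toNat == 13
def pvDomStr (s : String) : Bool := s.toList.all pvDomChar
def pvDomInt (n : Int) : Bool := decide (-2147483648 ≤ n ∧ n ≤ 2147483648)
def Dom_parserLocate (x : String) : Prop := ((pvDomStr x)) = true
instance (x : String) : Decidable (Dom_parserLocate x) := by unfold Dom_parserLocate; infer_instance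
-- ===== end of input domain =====

set_option maxHeartbeats 1000000
set_option maxRecDepth 8000


-- B replaces A's single interleaved index loop with four targeted find/rfind searches (idiomatic; no speed claim).

-- ===== PORT A =====
-- A's while-loop: index i, state (idxkb, idxkoma1, idxkoma2, idxkt, jumlah)
def pvLoopA : List Char → Int → Int → Int → Int → Int → Int → (Int × Int × Int × Int)
  | [], _, kb, k1, k2, kt, _ => (kb, k1, k2, kt)
  | c :: rest, i, kb, k1, k2, kt, j =>
    if c = '(' then pvLoopA rest (i+1) i k1 k2 kt j
    else if c = ')' then pvLoopA rest (i+1) kb k1 k2 i j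
    else if c = ',' ∧ j = 0 then pvLoopA rest (i+1) kb i k2 kt (j+1)
    else if c = ',' ∧ j = 1 then pvLoopA rest (i+1) kb k1 i kt j
    else pvLoopA rest (i+1) kb k1 k2 kt j

def parserLocate (x : String) : List Int :=
  let r := pvLoopA x.toList 0 (-1) (-1) (-1) (-1) 0
  [r.1, r.2.1, r.2.2.1, r.2.2.2]

-- ===== PORT B =====
def parserLocate_alt (x : String) : List Int :=
  let idxkb := PySem.Str.rfind x "("
  let idxkt := PySem.Str.rfind x ")"
  let idxkoma1 := PySem.Str.find x ","
  let r := PySem.Str.rfind x ","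
  let idxkoma2 := if r = idxkoma1 then -1 else r
  [idxkb, idxkoma1, idxkoma2, idxkt]

-- ===== PRECONDITION & SPEC =====
def Spec_parserLocate (x : String) (out : List Int) : Prop := out = parserLocate_alt x
instance (x : String) (out : List Int) : Decidable (Spec_parserLocate x out) := by unfold Spec_parserLocate; infer_instance

-- ===== CLAIM (what is proved, stated in full; the proofs are below) =====
def Claim_equal_parserLocate : Prop := ∀ (x : String), Dom_parserLocate x → Spec_parserLocate x (parserLocate x)

-- ===== LEMMAS AND PROOFS =====

-- index of the first occurrence of c (or -1)
def pvFirst (c : Char) : List Char → Int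
  | [] => -1
  | d :: t => if d = c then 0 else if pvFirst c t = -1 then -1 else pvFirst c t + 1

-- index of the last occurrence of c (or -1)
def pvLast (c : Char) : List Char → Int
  | [] => -1
  | d :: t => if pvLast c t = -1 then (if d = c then 0 else -1) else pvLast c t + 1

theorem pvFirst_ge (c : Char) (l : List Char) : -1 ≤ pvFirst c l := by
  induction l with
  | nil => simp [pvFirst]
  | cons d t ih => simp only [pvFirst]; split_ifs <;> omega

theorem pvLast_ge (c : Char) (l : List Char) : -1 ≤ pvLast c l := by
  induction l with
  | nil => simp [pvLast]
  | cons d t ih => simp only [pvLast]; split_ifs <;> omega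

theorem pvFirst_neg_iff_pvLast (c : Char) (l : List Char) :
    pvFirst c l = -1 ↔ pvLast c l = -1 := by
  induction l with
  | nil => simp [pvFirst, pvLast]
  | cons d t ih =>
    have h1 := pvFirst_ge c t
    have h2 := pvLast_ge c t
    simp only [pvFirst, pvLast]
    split_ifs <;> simp_all <;> omega

theorem find_go_single (c : Char) (cs : List Char) :
    ∀ k : Nat, PySem.Chars.find.go [c] cs k =
      if pvFirst c cs = -1 then -1 else (k : Int) + pvFirst c cs := by
  induction cs with
  | nil => intro k; simp [PySem.Chars.find.go, pvFirst, List.isEmpty]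
  | cons d t ih =>
    intro k
    have h := pvFirst_ge c t
    by_cases hd : c = d
    · subst hd
      simp [PySem.Chars.find.go, List.isPrefixOf, pvFirst]
    · have hdc : ¬ (d = c) := fun h' => hd h'.symm
      simp only [PySem.Chars.find.go, List.isPrefixOf, pvFirst]
      rw [ih (k+1)]
      simp [hd, hdc]
      split_ifs <;> push_cast <;> omega

theorem find_single (c : Char) (cs : List Char) :
    PySem.Chars.find cs [c] = pvFirst c cs := by
  have h := pvFirst_ge c cs
  rw [PySem.Chars.find, find_go_single]
  split_ifs with hf <;> omega

theorem prefix_single (c : Char) (l : List Char) :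
    [c].isPrefixOf l = (l.head? == some c) := by
  cases l with
  | nil => simp [List.isPrefixOf]
  | cons d t =>
    simp only [List.isPrefixOf, List.head?]
    by_cases h : c = d
    · subst h; simp
    · have : ¬ (d = c) := fun h' => h h'.symm
      simp [h, this]

theorem pvLast_concat (c d : Char) (l : List Char) :
    pvLast c (l ++ [d]) = if d = c then (l.length : Int) else pvLast c l := by
  induction l with
  | nil => simp [pvLast]
  | cons e t ih =>
    have h := pvLast_ge c t
    simp only [List.cons_append, pvLast, ih, List.length_cons]
    split_ifs <;> simp_all <;> omega

theorem rfind_go_single (c : Char) (cs : List Char) :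
    ∀ n : Nat, PySem.Chars.rfind.go cs [c] n = pvLast c (cs.take (n+1)) := by
  intro n
  induction n with
  | zero =>
    rw [PySem.Chars.rfind.go]
    rw [prefix_single]
    cases cs with
    | nil => simp [pvLast]
    | cons d t =>
      simp only [List.head?, List.take, pvLast]
      by_cases h : d = c <;> simp [h]
  | succ j ih =>
    rw [PySem.Chars.rfind.go, ih, prefix_single]
    by_cases hlt : j + 1 < cs.length
    · have hdrop : (cs.drop (j+1)).head? = cs[j+1]? := by
        rw [List.head?_drop]
      have htake : cs.take (j+2) = cs.take (j+1) ++ [cs[j+1]] := by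
        rw [List.take_add_one]
        simp [List.getElem?_eq_getElem hlt]
      rw [hdrop, htake, pvLast_concat]
      have hlen : (cs.take (j+1)).length = j + 1 := by
        simp [List.length_take]; omega
      by_cases hc : cs[j+1] = c
      · have heq : (cs[j+1]? == some c) = true := by
          simp [List.getElem?_eq_getElem hlt, hc]
        simp [heq, hc, hlen]
      · have hne : (cs[j+1]? == some c) = false := by
          simp [List.getElem?_eq_getElem hlt, hc]
        simp [hc, hne]
    · have hge : cs.length ≤ j + 1 := by omega
      have hdrop : cs.drop (j+1) = [] := List.drop_eq_nil_of_le hge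
      have h1 : cs.take (j+2) = cs := List.take_of_length_le (by omega)
      have h2 : cs.take (j+1) = cs := List.take_of_length_le hge
      simp [hdrop, h1, h2]

theorem rfind_single (c : Char) (cs : List Char) :
    PySem.Chars.rfind cs [c] = pvLast c cs := by
  rw [PySem.Chars.rfind, rfind_go_single]
  congr 1
  exact List.take_of_length_le (by omega)

-- A's loop once jumlah = 1: every later comma overwrites idxkoma2
theorem pvLoopA_one (cs : List Char) :
    ∀ (i kb k1 k2 kt : Int), pvLoopA cs i kb k1 k2 kt 1 =
      ((if pvLast '(' cs = -1 then kb else i + pvLast '(' cs),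
        k1,
        (if pvLast ',' cs = -1 then k2 else i + pvLast ',' cs),
        (if pvLast ')' cs = -1 then kt else i + pvLast ')' cs)) := by
  induction cs with
  | nil => intro i kb k1 k2 kt; simp [pvLoopA, pvLast]
  | cons d t ih =>
    intro i kb k1 k2 kt
    have hb := pvLast_ge '(' t
    have hk := pvLast_ge ',' t
    have ht := pvLast_ge ')' t
    by_cases h1 : d = '('
    · subst h1
      rw [pvLoopA, if_pos rfl, ih]
      clear ih
      simp only [pvLast, Prod.mk.injEq, reduceIte]
      split_ifs <;> simp_all <;> omega
    · by_cases h2 : d = ')'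
      · subst h2
        rw [pvLoopA, if_neg (by decide), if_pos rfl, ih]
        clear ih
        simp only [pvLast, Prod.mk.injEq, reduceIte]
        split_ifs <;> simp_all <;> omega
      · by_cases h3 : d = ','
        · subst h3
          rw [pvLoopA, if_neg (by decide), if_neg (by decide),
              if_neg (by simp), if_pos (by simp), ih]
          clear ih
          simp only [pvLast, Prod.mk.injEq, reduceIte]
          split_ifs <;> simp_all <;> omega
        · rw [pvLoopA, if_neg h1, if_neg h2,
              if_neg (by simp [h3]), if_neg (by simp [h3]), ih]
          clear ih
          simp only [pvLast, Prod.mk.injEq, reduceIte]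
          split_ifs <;> simp_all <;> omega

-- A's loop from jumlah = 0
theorem pvLoopA_zero (cs : List Char) :
    ∀ (i kb k1 k2 kt : Int), pvLoopA cs i kb k1 k2 kt 0 =
      ((if pvLast '(' cs = -1 then kb else i + pvLast '(' cs),
        (if pvFirst ',' cs = -1 then k1 else i + pvFirst ',' cs),
        (if pvFirst ',' cs = pvLast ',' cs then k2 else i + pvLast ',' cs),
        (if pvLast ')' cs = -1 then kt else i + pvLast ')' cs)) := by
  induction cs with
  | nil => intro i kb k1 k2 kt; simp [pvLoopA, pvLast, pvFirst]
  | cons d t ih =>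
    intro i kb k1 k2 kt
    have hb := pvLast_ge '(' t
    have hk := pvLast_ge ',' t
    have ht := pvLast_ge ')' t
    have hf := pvFirst_ge ',' t
    have hfl := pvFirst_neg_iff_pvLast ',' t
    by_cases h1 : d = '('
    · subst h1
      rw [pvLoopA, if_pos rfl, ih]
      clear ih
      simp only [pvLast, pvFirst, Prod.mk.injEq, reduceIte]
      refine ⟨?_, ?_, ?_, ?_⟩ <;> (split_ifs <;> first | omega | (simp_all; try omega))
    · by_cases h2 : d = ')'
      · subst h2
        rw [pvLoopA, if_neg (by decide), if_pos rfl, ih]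
        clear ih
        simp only [pvLast, pvFirst, Prod.mk.injEq, reduceIte]
        refine ⟨?_, ?_, ?_, ?_⟩ <;> (split_ifs <;> first | omega | (simp_all; try omega))
      · by_cases h3 : d = ','
        · subst h3
          rw [pvLoopA, if_neg (by decide), if_neg (by decide),
              if_pos (by simp)]
          norm_num
          rw [pvLoopA_one]
          clear ih
          simp only [pvLast, pvFirst, Prod.mk.injEq, reduceIte]
          refine ⟨?_, ?_, ?_, ?_⟩ <;> (split_ifs <;> first | omega | (simp_all; try omega))
        · rw [pvLoopA, if_neg h1, if_neg h2,
              if_neg (by simp [h3]), if_neg (by simp [h3]), ih]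
          clear ih
          simp only [pvLast, pvFirst, Prod.mk.injEq, reduceIte]
          refine ⟨?_, ?_, ?_, ?_⟩ <;> (split_ifs <;> first | omega | (simp_all; try omega))

-- ===== VERDICT (by name: the statement is the Claim_ definition above) =====
theorem parserLocate_spec : Claim_equal_parserLocate := by
  intro x _
  unfold Spec_parserLocate parserLocate parserLocate_alt
  have hb := pvLast_ge '(' x.toList
  have hk := pvLast_ge ',' x.toList
  have ht := pvLast_ge ')' x.toList
  have hf := pvFirst_ge ',' x.toList
  have e1 : PySem.Str.rfind x "(" = pvLast '(' x.toList := by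
    rw [PySem.Str.rfind]; exact rfind_single _ _
  have e2 : PySem.Str.rfind x ")" = pvLast ')' x.toList := by
    rw [PySem.Str.rfind]; exact rfind_single _ _
  have e3 : PySem.Str.rfind x "," = pvLast ',' x.toList := by
    rw [PySem.Str.rfind]; exact rfind_single _ _
  have e4 : PySem.Str.find x "," = pvFirst ',' x.toList := by
    rw [PySem.Str.find]; exact find_single _ _
  rw [pvLoopA_zero, e1, e2, e3, e4]
  simp only [List.cons.injEq, and_true]
  refine ⟨by split_ifs <;> omega, by split_ifs <;> omega,
          by split_ifs <;> omega, by split_ifs <;> omega⟩
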